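-- pv_equiv track=rewrite | github.com/yeonjy/AlgorithmChallenge | Programmers/Level1/Python/pgm42840.py | solution
-- ===== SOURCE A (Python) =====
-- def solution(answers):
--     answer1 = [1, 2, 3, 4, 5]
--     answer2 = [2, 1, 2, 3, 2, 4, 2, 5]
--     answer3 = [3, 3, 1, 1, 2, 2, 4, 4, 5, 5]
--     res = [0, 0, 0]
--
--     ans_len = len(answers)
--     for an in answer1, answer2, answer3:
--         an *= (ans_len // len(an) + 1)
--     j = 0
--     for an in answer1, answer2, answer3:
--         for i in range(ans_len):
--             if answers[i] == an[i]:
--                 res[j] += 1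
--         j += 1
--
--     answer = []
--     tmp = max(res)
--
--     if res[0] == tmp:
--         answer.append(1)
--     if res[1] == tmp:
--         answer.append(2)
--     if res[2] == tmp:
--         answer.append(3)
--     return answer
-- ===== SOURCE B (Python) =====
-- def solution(answers):
--     a1 = [1, 2, 3, 4, 5]
--     a2 = [2, 1, 2, 3, 2, 4, 2, 5]
--     a3 = [3, 3, 1, 1, 2, 2, 4, 4, 5, 5]
--     r0 = r1 = r2 = 0
--     for i, v in enumerate(answers):
--         if v == a1[i % 5]:
--             r0 += 1
--         if v == a2[i % 8]:
--             r1 += 1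
--         if v == a3[i % 10]:
--             r2 += 1
--     res = [r0, r1, r2]
--     tmp = max(res)
--     return [k + 1 for k in range(3) if res[k] == tmp]
-- ===== Notes on version B (the rewrite author's own statement) =====
-- stated objective: simpler
-- what changed: Replaces A's pattern-list extension (list *= n//len+1) followed by three separate index-loop counting passes with a single pass over the answers using modular indexing into the three fixed patterns.
import Mathlib
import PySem

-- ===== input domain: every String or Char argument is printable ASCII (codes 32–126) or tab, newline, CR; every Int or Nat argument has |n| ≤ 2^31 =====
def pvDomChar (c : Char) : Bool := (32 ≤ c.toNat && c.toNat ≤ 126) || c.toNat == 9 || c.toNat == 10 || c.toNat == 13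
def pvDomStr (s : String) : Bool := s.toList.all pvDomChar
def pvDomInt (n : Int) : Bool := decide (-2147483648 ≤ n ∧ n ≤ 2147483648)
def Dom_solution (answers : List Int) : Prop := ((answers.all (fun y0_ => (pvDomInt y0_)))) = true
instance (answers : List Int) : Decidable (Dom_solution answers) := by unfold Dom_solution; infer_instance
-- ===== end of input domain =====

-- B replaces A's pattern-list extension plus three counting passes by one modular-indexed pass (objective: simpler).

-- ===== PORT A =====
-- Python `patt * n`
def pyRep (l : List Int) (n : Nat) : List Int := (List.replicate n l).flatten

def solution (answers : List Int) : List Int :=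
  let ansLen := answers.length
  let a1 := pyRep [1, 2, 3, 4, 5] (ansLen / 5 + 1)
  let a2 := pyRep [2, 1, 2, 3, 2, 4, 2, 5] (ansLen / 8 + 1)
  let a3 := pyRep [3, 3, 1, 1, 2, 2, 4, 4, 5, 5] (ansLen / 10 + 1)
  let r0 := (List.range ansLen).foldl
    (fun acc i => if answers.getD i 0 = a1.getD i 0 then acc + 1 else acc) (0 : Int)
  let r1 := (List.range ansLen).foldl
    (fun acc i => if answers.getD i 0 = a2.getD i 0 then acc + 1 else acc) (0 : Int)
  let r2 := (List.range ansLen).foldl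
    (fun acc i => if answers.getD i 0 = a3.getD i 0 then acc + 1 else acc) (0 : Int)
  let tmp := max r0 (max r1 r2)
  ((if r0 = tmp then [1] else []) ++ (if r1 = tmp then [2] else [])) ++
    (if r2 = tmp then [3] else [])

-- ===== PORT B =====
-- `for i, v in enumerate(answers)` updating the three counters
def altLoop (a1 a2 a3 : List Int) : List Int → Nat → Int × Int × Int → Int × Int × Int
  | [], _, r => r
  | v :: vs, i, (r0, r1, r2) =>
      altLoop a1 a2 a3 vs (i + 1)
        ((if v = a1.getD (i % 5) 0 then r0 + 1 else r0),
         (if v = a2.getD (i % 8) 0 then r1 + 1 else r1),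
         (if v = a3.getD (i % 10) 0 then r2 + 1 else r2))

def solution_alt (answers : List Int) : List Int :=
  let a1 : List Int := [1, 2, 3, 4, 5]
  let a2 : List Int := [2, 1, 2, 3, 2, 4, 2, 5]
  let a3 : List Int := [3, 3, 1, 1, 2, 2, 4, 4, 5, 5]
  let r := altLoop a1 a2 a3 answers 0 (0, 0, 0)
  let res : List Int := [r.1, r.2.1, r.2.2]
  let tmp := max r.1 (max r.2.1 r.2.2)
  (List.range 3).filterMap (fun k => if res.getD k 0 = tmp then some ((k : Int) + 1) else none)

-- ===== PRECONDITION & SPEC =====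
def Spec_solution (answers : List Int) (out : List Int) : Prop := out = solution_alt answers
instance (answers : List Int) (out : List Int) : Decidable (Spec_solution answers out) := by unfold Spec_solution; infer_instance

-- ===== CLAIM (what is proved, stated in full; the proofs are below) =====
def Claim_equal_solution : Prop := ∀ (answers : List Int), Dom_solution answers → Spec_solution answers (solution answers)

-- ===== LEMMAS AND PROOFS =====

-- index-offset count of matches, shared characterisation of both loops
def cnt (F : Nat → Int → Bool) : List Int → Nat → Int
  | [], _ => 0
  | v :: vs, i => (if F i v then 1 else 0) + cnt F vs (i + 1)

theorem cnt_congr (F G : Nat → Int → Bool) (xs : List Int) (off : Nat)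
    (h : ∀ j v, off ≤ j → j < off + xs.length → F j v = G j v) :
    cnt F xs off = cnt G xs off := by
  induction xs generalizing off with
  | nil => rfl
  | cons v vs ih =>
      simp only [cnt]
      rw [h off v le_rfl (by simp), ih (off + 1) (fun j v h1 h2 => h j v (by omega) (by simp at h2 ⊢; omega))]

theorem rangeFold_eq_cnt (xs : List Int) (F : Nat → Int → Bool) (off : Nat) (acc : Int) :
    (List.range xs.length).foldl
      (fun a j => if F (off + j) (xs.getD j 0) then a + 1 else a) acc
      = acc + cnt F xs off := by
  induction xs generalizing off acc with
  | nil => simp [cnt]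
  | cons x xs ih =>
      rw [List.length_cons, List.range_succ_eq_map, List.foldl_cons, List.foldl_map]
      simp only [List.getD_cons_zero, List.getD_cons_succ, cnt]
      have hf : (fun (a : Int) (j : Nat) => if F (off + (j + 1)) (xs.getD j 0) then a + 1 else a)
          = (fun (a : Int) (j : Nat) => if F (off + 1 + j) (xs.getD j 0) then a + 1 else a) := by
        funext a j
        rw [show off + (j + 1) = off + 1 + j from by omega]
      rw [hf, ih (off + 1) _]
      simp only [Nat.add_zero]
      split_ifs <;> ring

theorem altLoop_eq_cnt (a1 a2 a3 : List Int) (xs : List Int) (i : Nat) (r0 r1 r2 : Int) :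
    altLoop a1 a2 a3 xs i (r0, r1, r2) =
      (r0 + cnt (fun j v => v = a1.getD (j % 5) 0) xs i,
       r1 + cnt (fun j v => v = a2.getD (j % 8) 0) xs i,
       r2 + cnt (fun j v => v = a3.getD (j % 10) 0) xs i) := by
  induction xs generalizing i r0 r1 r2 with
  | nil => simp [altLoop, cnt]
  | cons v vs ih =>
      simp only [altLoop, cnt, ih]
      refine Prod.ext ?_ (Prod.ext ?_ ?_) <;> simp <;> split_ifs <;> ring

theorem pyRep_getD (l : List Int) (k j : Nat) (hj : j < l.length * k) :
    (pyRep l k).getD j 0 = l.getD (j % l.length) 0 := by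
  induction k generalizing j with
  | zero => omega
  | succ k ih =>
      simp only [pyRep, List.replicate_succ, List.flatten_cons]
      by_cases h : j < l.length
      · rw [List.getD_append _ _ _ _ h, Nat.mod_eq_of_lt h]
      · have hl : 0 < l.length := by by_contra h0; simp at h0; simp [h0] at hj
        have : j = l.length + (j - l.length) := by omega
        rw [this, List.getD_append_right _ _ _ _ (by omega)]
        have h2 : l.length + (j - l.length) - l.length = j - l.length := by omega
        rw [h2, Nat.add_mod_left]
        have hexp : l.length * (k + 1) = l.length * k + l.length := by ring
        exact (ih (j - l.length) (by omega))

-- A's count over an extended pattern equals the modular-index count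
theorem countA_eq (answers patt : List Int) (m : Nat) (hm : patt.length = m) (hp : 0 < m) :
    (List.range answers.length).foldl
      (fun acc i => if answers.getD i 0 = (pyRep patt (answers.length / m + 1)).getD i 0
        then acc + 1 else acc) (0 : Int)
      = cnt (fun j v => decide (v = patt.getD (j % m) 0)) answers 0 := by
  subst hm
  have key := rangeFold_eq_cnt answers
    (fun j v => decide (v = (pyRep patt (answers.length / patt.length + 1)).getD j 0)) 0 0
  simp only [decide_eq_true_eq, zero_add] at key
  rw [key]
  apply cnt_congr
  intro j v _ hj
  simp only [Nat.zero_add] at hj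
  have hj2 : j < patt.length * (answers.length / patt.length + 1) := by
    have h1 : answers.length < patt.length * (answers.length / patt.length + 1) :=
      Nat.lt_mul_div_succ _ hp
    omega
  rw [pyRep_getD patt _ j hj2]

-- the shared tail: the appended ifs equal the range-3 comprehension
theorem tail_eq (r0 r1 r2 : Int) :
    ((if r0 = max r0 (max r1 r2) then [(1 : Int)] else []) ++
      (if r1 = max r0 (max r1 r2) then [2] else [])) ++
      (if r2 = max r0 (max r1 r2) then [3] else []) =
    (List.range 3).filterMap
      (fun k => if [r0, r1, r2].getD k 0 = max r0 (max r1 r2) then some ((k : Int) + 1) else none) := by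
  have h3 : List.range 3 = [0, 1, 2] := rfl
  rw [h3]
  simp only [List.filterMap_cons, List.filterMap_nil, List.getD_cons_zero, List.getD_cons_succ]
  split_ifs <;> norm_num

-- ===== VERDICT (by name: the statement is the Claim_ definition above) =====
theorem solution_spec : Claim_equal_solution := by
  intro answers _
  unfold Spec_solution solution solution_alt
  simp only [altLoop_eq_cnt, zero_add]
  rw [countA_eq answers [1, 2, 3, 4, 5] 5 rfl (by norm_num),
      countA_eq answers [2, 1, 2, 3, 2, 4, 2, 5] 8 rfl (by norm_num),
      countA_eq answers [3, 3, 1, 1, 2, 2, 4, 4, 5, 5] 10 rfl (by norm_num)]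
  exact tail_eq _ _ _
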